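-- pv_equiv track=rewrite | github.com/denglixi/Menu2Recipe | text_match.py | clean_unmatched_text_by_attribute
-- ===== SOURCE A (Python) =====
-- def clean_unmatched_text_by_attribute(attributes, unmatched_text):
--     result_dict = {}
--     for item in unmatched_text:
--         item_added = False
--         for k in attributes:
--             if item in attributes[k]:
--                 if k not in result_dict:
--                     result_dict[k] = [item]
--                 else:
--                     result_dict[k].append(item)
--                 item_added = True
--                 break
--         if not item_added:
--             if 'unknow' not in result_dict:
--                 result_dict['unknow'] = [item]
--             else:
--                 result_dict['unknow'].append(item)
--
--     return result_dict
-- ===== SOURCE B (Python) =====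
-- def clean_unmatched_text_by_attribute(attributes, unmatched_text):
--     # Precompute value -> first attribute key containing it (attribute order, first wins),
--     # then group each item by one O(1) lookup.
--     index = {}
--     for k, vs in attributes.items():
--         for v in vs:
--             if v not in index:
--                 index[v] = k
--     result = {}
--     for item in unmatched_text:
--         key = index.get(item, 'unknow')
--         if key in result:
--             result[key].append(item)
--         else:
--             result[key] = [item]
--     return result
-- ===== Notes on version B (the rewrite author's own statement) =====
-- stated objective: faster
-- what changed: Replaces the per-item scan over all attribute lists with a value-to-first-key dictionary built once, so each item is classified by a single hash lookup.
import Mathlib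
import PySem

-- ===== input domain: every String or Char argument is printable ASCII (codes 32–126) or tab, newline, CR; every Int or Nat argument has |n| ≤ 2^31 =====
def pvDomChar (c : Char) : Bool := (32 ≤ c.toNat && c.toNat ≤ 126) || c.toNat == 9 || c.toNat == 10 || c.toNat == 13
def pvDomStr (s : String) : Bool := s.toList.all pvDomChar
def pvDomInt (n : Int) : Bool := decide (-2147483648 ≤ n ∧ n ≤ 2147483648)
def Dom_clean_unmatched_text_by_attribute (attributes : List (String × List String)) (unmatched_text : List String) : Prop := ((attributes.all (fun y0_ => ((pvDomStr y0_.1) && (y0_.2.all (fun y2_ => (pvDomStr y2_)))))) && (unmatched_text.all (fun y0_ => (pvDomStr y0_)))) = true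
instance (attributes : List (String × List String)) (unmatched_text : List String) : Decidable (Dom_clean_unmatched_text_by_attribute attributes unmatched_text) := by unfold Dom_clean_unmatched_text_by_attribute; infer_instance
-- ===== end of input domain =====

-- B replaces A's per-item scan over every attribute list with a value→first-key dictionary
-- built once, so each item is classified by one lookup (objective: faster).


-- ===== PORT A =====
-- A's inner 'for k in attributes: if item in attributes[k]: …; break' — first key whose list contains item.
def pvFirstKeyA (item : String) : List (String × List String) → Option String
  | [] => none
  | (k, vs) :: rest => if vs.contains item then some k else pvFirstKeyA item rest

-- 'if k not in result_dict: result_dict[k] = [item] else: result_dict[k].append(item)'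
def pvAddA (d : PySem.Dict String (List String)) (k : String) (item : String) : PySem.Dict String (List String) :=
  if d.contains k then d.insert k (d.getD k [] ++ [item]) else d.insert k [item]

def clean_unmatched_text_by_attribute (attributes : List (String × List String)) (unmatched_text : List String) : List (String × List String) :=
  let attrs := PySem.Dict.ofList attributes
  (unmatched_text.foldl (fun rd item =>
      match pvFirstKeyA item attrs.items with
      | some k => pvAddA rd k item
      | none => pvAddA rd "unknow" item)
    PySem.Dict.empty).items

-- ===== PORT B =====
-- value → first attribute key containing it
def pvBuildIndex (pairs : List (String × List String)) : PySem.Dict String String :=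
  pairs.foldl (fun ix p =>
      p.2.foldl (fun ix v => if ix.contains v then ix else ix.insert v p.1) ix)
    PySem.Dict.empty

def clean_unmatched_text_by_attribute_alt (attributes : List (String × List String)) (unmatched_text : List String) : List (String × List String) :=
  let attrs := PySem.Dict.ofList attributes
  let index := pvBuildIndex attrs.items
  (unmatched_text.foldl (fun rd item =>
      let key := index.getD item "unknow"
      if rd.contains key then rd.insert key (rd.getD key [] ++ [item]) else rd.insert key [item])
    PySem.Dict.empty).items

-- ===== PRECONDITION & SPEC =====
def Spec_clean_unmatched_text_by_attribute (attributes : List (String × List String)) (unmatched_text : List String) (out : List (String × List String)) : Prop := out = clean_unmatched_text_by_attribute_alt attributes unmatched_text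
instance (attributes : List (String × List String)) (unmatched_text : List String) (out : List (String × List String)) : Decidable (Spec_clean_unmatched_text_by_attribute attributes unmatched_text out) := by unfold Spec_clean_unmatched_text_by_attribute; infer_instance

-- ===== CLAIM (what is proved, stated in full; the proofs are below) =====
def Claim_equal_clean_unmatched_text_by_attribute : Prop := ∀ (attributes : List (String × List String)) (unmatched_text : List String), Dom_clean_unmatched_text_by_attribute attributes unmatched_text → Spec_clean_unmatched_text_by_attribute attributes unmatched_text (clean_unmatched_text_by_attribute attributes unmatched_text)

-- ===== LEMMAS AND PROOFS =====
-- insert-if-absent over one value list: lookup is old value first, else the new key if present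
lemma pvIdx_inner (vs : List String) (k : String) (ix : PySem.Dict String String) (v : String) :
    (vs.foldl (fun ix v => if ix.contains v then ix else ix.insert v k) ix).get? v
      = ((ix.get? v).orElse (fun _ => if vs.contains v then some k else none)) := by
  induction vs generalizing ix with
  | nil => cases h : ix.get? v <;> simp [Option.orElse, h]
  | cons w vs ih =>
    simp only [List.foldl_cons, ih]
    by_cases hc : ix.contains w = true
    · rw [if_pos hc]
      by_cases hv : w = v
      · subst hv
        rw [PySem.Dict.contains_eq_isSome_get?] at hc
        cases h : ix.get? w <;> simp [h] at hc ⊢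
      · cases h : ix.get? v <;> simp [Option.orElse, Ne.symm hv]
    · rw [if_neg hc]
      rw [PySem.Dict.contains_eq_isSome_get?] at hc
      by_cases hv : w = v
      · subst hv
        cases h : ix.get? w with
        | some _ => simp [h] at hc
        | none => simp [PySem.Dict.get?_insert_self, Option.orElse]
      · rw [PySem.Dict.get?_insert]
        rw [if_neg (Ne.symm hv)]
        cases h : ix.get? v <;> simp [Option.orElse, Ne.symm hv]

lemma pvIdx_outer (pairs : List (String × List String)) (ix : PySem.Dict String String) (v : String) :
    (pairs.foldl (fun ix p => p.2.foldl (fun ix v => if ix.contains v then ix else ix.insert v p.1) ix) ix).get? v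
      = ((ix.get? v).orElse (fun _ => pvFirstKeyA v pairs)) := by
  induction pairs generalizing ix with
  | nil => cases h : ix.get? v <;> simp [pvFirstKeyA, Option.orElse, h]
  | cons p rest ih =>
    simp only [List.foldl_cons, ih, pvIdx_inner]
    cases h : ix.get? v with
    | some _ => simp [Option.orElse]
    | none =>
      simp only [Option.orElse, pvFirstKeyA]
      by_cases hv : v ∈ p.2 <;> simp [hv]

lemma pvIndex_getD (pairs : List (String × List String)) (v : String) :
    (pvBuildIndex pairs).getD v "unknow" = (pvFirstKeyA v pairs).getD "unknow" := by
  rw [PySem.Dict.getD_eq_get?_getD, pvBuildIndex, pvIdx_outer]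
  simp [PySem.Dict.get?_empty, Option.orElse]

-- ===== VERDICT (by name: the statement is the Claim_ definition above) =====
theorem clean_unmatched_text_by_attribute_spec : Claim_equal_clean_unmatched_text_by_attribute := by
  intro attributes unmatched_text _
  unfold Spec_clean_unmatched_text_by_attribute
  unfold clean_unmatched_text_by_attribute clean_unmatched_text_by_attribute_alt
  simp only []
  congr 1
  apply PySem.List.foldl_congr_mem
  intro rd item _
  rw [pvIndex_getD]
  cases h : pvFirstKeyA item (PySem.Dict.ofList attributes).items <;>
    simp [pvAddA]
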